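-- pv_equiv track=rewrite | github.com/patrikhardin/adventofcode | aoc2018/AdventOfCode42.py | largestLogCol
-- ===== SOURCE A (Python) =====
-- def largestLogCol(log):
--     maxSum = 0
--     minute = 0
--     for column in range(len(log[0])):
--         s = 0
--         for row in range(len(log)):
--             s += log[row][column]
--         if s > maxSum:
--             maxSum = s
--             minute = column
--     return maxSum, minute
-- ===== SOURCE B (Python) =====
-- def largestLogCol(log):
--     sums = [0] * len(log[0])
--     for row in log:
--         sums = [s + v for s, v in zip(sums, row)]
--     maxSum = 0
--     minute = 0
--     for j, s in enumerate(sums):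
--         if s > maxSum:
--             maxSum = s
--             minute = j
--     return maxSum, minute
-- ===== Notes on version B (the rewrite author's own statement) =====
-- stated objective: alternative
-- what changed: Inverted the loop nesting: one row-major pass builds the whole column-sum vector via zip, then a single scan over enumerate(sums) picks the first strictly maximal column, instead of recomputing each column sum with a nested column-outer/row-inner index loop.
import Mathlib
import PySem

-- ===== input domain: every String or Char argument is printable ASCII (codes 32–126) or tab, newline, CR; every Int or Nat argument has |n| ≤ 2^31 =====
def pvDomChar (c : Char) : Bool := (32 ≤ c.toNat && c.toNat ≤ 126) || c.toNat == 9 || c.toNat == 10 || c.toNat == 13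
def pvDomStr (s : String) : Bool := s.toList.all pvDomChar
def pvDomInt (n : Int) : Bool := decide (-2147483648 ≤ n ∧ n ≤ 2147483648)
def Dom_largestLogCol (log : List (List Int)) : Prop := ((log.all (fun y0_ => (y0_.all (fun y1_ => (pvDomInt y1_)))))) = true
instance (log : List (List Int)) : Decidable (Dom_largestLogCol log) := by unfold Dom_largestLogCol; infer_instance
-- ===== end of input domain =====

-- B inverts the loop nesting: one row-major pass builds the column-sum vector, then one scan
-- picks the first strictly maximal column (alternative decomposition; same asymptotic cost).

-- ===== PORT A =====
def largestLogCol (log : List (List Int)) : Int × Int :=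
  (PySem.List.pyRange 0 (((PySem.List.pyGetD log 0 []).length : Int)) 1).foldl
    (fun st column =>
      let s : Int :=
        (PySem.List.pyRange 0 ((log.length : Int)) 1).foldl
          (fun s row => s + PySem.List.pyGetD (PySem.List.pyGetD log row []) column 0) 0
      if s > st.1 then (s, column) else st)
    (0, 0)

-- ===== PORT B =====
def largestLogCol_alt (log : List (List Int)) : Int × Int :=
  let sums0 : List Int := List.replicate (PySem.List.pyGetD log 0 []).length 0
  let sums : List Int :=
    log.foldl (fun sums row => (sums.zip row).map (fun p => p.1 + p.2)) sums0
  (PySem.List.enumerate sums 0).foldl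
    (fun st js => if js.2 > st.1 then (js.2, js.1) else st) (0, 0)

-- ===== PRECONDITION & SPEC =====
-- Pre_ is exactly A's normal-return domain: A raises IndexError on an empty log (log[0])
-- and on any row shorter than the first row (log[row][column]).
def Pre_largestLogCol (log : List (List Int)) : Prop :=
  log ≠ [] ∧ ∀ r ∈ log, log.headI.length ≤ r.length
instance (log : List (List Int)) : Decidable (Pre_largestLogCol log) := by
  unfold Pre_largestLogCol; infer_instance
def pvWitness_largestLogCol : List (List Int) := [[1, -2], [3, 4], [0, 5]]
def Spec_largestLogCol (log : List (List Int)) (out : Int × Int) : Prop := out = largestLogCol_alt log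
instance (log : List (List Int)) (out : Int × Int) : Decidable (Spec_largestLogCol log out) := by unfold Spec_largestLogCol; infer_instance

-- ===== CLAIM (what is proved, stated in full; the proofs are below) =====
def Claim_equal_largestLogCol : Prop := ∀ (log : List (List Int)), Dom_largestLogCol log → Pre_largestLogCol log → Spec_largestLogCol log (largestLogCol log)

-- ===== LEMMAS AND PROOFS =====

-- column sum of column j, as both programs compute it
def colS (log : List (List Int)) (j : Int) : Int :=
  log.foldl (fun s r => s + PySem.List.pyGetD r j 0) 0

-- the zip-add fold maintains, at index k, the running column sum started from acc[k]
theorem sums_inv (log : List (List Int)) (acc : List Int)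
    (h : ∀ r ∈ log, acc.length ≤ r.length) :
    log.foldl (fun sums row => (sums.zip row).map (fun p => p.1 + p.2)) acc
      = (List.range acc.length).map
          (fun k : Nat => log.foldl (fun s r => s + PySem.List.pyGetD r ((k : Nat) : Int) 0) (acc.getD k 0)) := by
  induction log generalizing acc with
  | nil =>
    simp only [List.foldl_nil]
    apply List.ext_getElem (by simp)
    intro k h1 h2
    simp [List.getD_eq_getElem?_getD, List.getElem?_eq_getElem h1]
  | cons r t ih =>
    have hr : acc.length ≤ r.length := h r (by simp)
    have hlen : ((acc.zip r).map (fun p : Int × Int => p.1 + p.2)).length = acc.length := by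
      simp [Nat.min_eq_left hr]
    simp only [List.foldl_cons]
    rw [ih _ (by intro r' hr'; rw [hlen]; exact h r' (by simp [hr']))]
    rw [hlen]
    apply List.map_congr_left
    intro k hk
    have hk' : k < acc.length := List.mem_range.mp hk
    have hkr : k < r.length := lt_of_lt_of_le hk' hr
    have hzk : k < (acc.zip r).length := by simp [Nat.min_eq_left hr]; exact hk'
    congr 1
    rw [List.getD_eq_getElem?_getD, List.getElem?_map, List.getElem?_eq_getElem hzk]
    rw [List.getD_eq_getElem?_getD, List.getElem?_eq_getElem hk']
    simp [List.getElem_zip, List.getD_eq_getElem?_getD, List.getElem?_eq_getElem hkr]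

theorem enumerate_map {α β : Type} (f : α → β) (xs : List α) (s : Int) :
    PySem.List.enumerate (xs.map f) s = (PySem.List.enumerate xs s).map (fun p => (p.1, f p.2)) := by
  induction xs generalizing s with
  | nil => simp [PySem.List.enumerate_nil]
  | cons x t ih => simp [PySem.List.enumerate_cons, ih]

theorem enumerate_range (n : Nat) (s : Int) :
    PySem.List.enumerate (List.range n) s
      = (List.range n).map (fun k : Nat => (s + (k : Int), k)) := by
  induction n generalizing s with
  | zero => simp [PySem.List.enumerate_nil]
  | succ m ih =>
    rw [List.range_succ, PySem.List.enumerate_append, ih]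
    simp [PySem.List.enumerate_cons, PySem.List.enumerate_nil]

-- ===== VERDICT (by name: the statement is the Claim_ definition above) =====
theorem largestLogCol_spec : Claim_equal_largestLogCol := by
  intro log _ hpre
  obtain ⟨hne, hrows⟩ := hpre
  obtain ⟨r0, t, rfl⟩ := List.exists_cons_of_ne_nil hne
  unfold Spec_largestLogCol largestLogCol largestLogCol_alt
  have hhead : PySem.List.pyGetD (r0 :: t) 0 [] = r0 := PySem.List.pyGetD_zero_cons _ _ _
  rw [hhead]
  set log := r0 :: t with hlog
  -- A side: inner fold over row indices is a structural fold over log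
  have hinner : ∀ column : Int,
      (PySem.List.pyRange 0 ((log.length : Int)) 1).foldl
        (fun s row => s + PySem.List.pyGetD (PySem.List.pyGetD log row []) column 0) 0
      = colS log column := by
    intro column
    exact PySem.List.foldl_pyRange_zero_pyGetD' log []
      (fun s r => s + PySem.List.pyGetD r column 0) 0
  simp only [hinner]
  -- B side: the final sums vector is the vector of column sums
  have hsums : log.foldl (fun sums row => (sums.zip row).map (fun p => p.1 + p.2))
        (List.replicate r0.length 0)
      = (List.range r0.length).map (fun k : Nat => colS log (k : Int)) := by
    rw [sums_inv log _ (by intro r hr; simpa using hrows r hr)]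
    simp only [List.length_replicate]
    apply List.map_congr_left
    intro k hk
    simp [colS, List.getD_eq_getElem?_getD, List.mem_range.mp hk]
  rw [hsums, enumerate_map, enumerate_range, List.map_map, List.foldl_map,
    PySem.List.pyRange_one, List.foldl_map]
  simp

-- Dom ∧ Pre_ hold at the witness
theorem pvWitness_largestLogCol_ok :
    Dom_largestLogCol pvWitness_largestLogCol ∧ Pre_largestLogCol pvWitness_largestLogCol := by
  decide
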